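-- pv_equiv track=rewrite | github.com/Jameshuff91/open-cure | scripts/h261_pathway_weighted_ppi.py | get_ppi_extended_targets
-- ===== SOURCE A (Python) =====
-- from typing import Dict, List, Set, Tuple
--
-- def get_ppi_extended_targets(
--     drug_targets: Set[str],
--     ppi_network: Dict[str, Set[str]],
--     hops: int = 1
-- ) -> Set[str]:
--     """Extend drug targets through PPI network by N hops."""
--     extended = set(drug_targets)
--     current = set(drug_targets)
--
--     for _ in range(hops):
--         next_hop = set()
--         for gene in current:
--             if gene in ppi_network:
--                 next_hop.update(ppi_network[gene])
--         extended.update(next_hop)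
--         current = next_hop
--
--     return extended
-- ===== SOURCE B (Python) =====
-- def get_ppi_extended_targets(drug_targets, ppi_network, hops=1):
--     """Extend drug targets through PPI network by N hops (BFS with a visited set:
--     only newly discovered genes are expanded at each hop)."""
--     visited = set(drug_targets)
--     frontier = list(visited)
--     for _ in range(hops):
--         new = []
--         for gene in frontier:
--             for nb in ppi_network.get(gene, ()):
--                 if nb not in visited:
--                     visited.add(nb)
--                     new.append(nb)
--         frontier = new
--     return visited
-- ===== Notes on version B (the rewrite author's own statement) =====
-- stated objective: alternative
-- what changed: A re-scans the whole reached frontier every hop (next_hop keeps already-visited genes, which get re-expanded), B is a standard BFS with a visited set that expands only the genes newly discovered in the previous hop, scanning each adjacency list at most once; on the measured inputs the two run at the same speed.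
import Mathlib
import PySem

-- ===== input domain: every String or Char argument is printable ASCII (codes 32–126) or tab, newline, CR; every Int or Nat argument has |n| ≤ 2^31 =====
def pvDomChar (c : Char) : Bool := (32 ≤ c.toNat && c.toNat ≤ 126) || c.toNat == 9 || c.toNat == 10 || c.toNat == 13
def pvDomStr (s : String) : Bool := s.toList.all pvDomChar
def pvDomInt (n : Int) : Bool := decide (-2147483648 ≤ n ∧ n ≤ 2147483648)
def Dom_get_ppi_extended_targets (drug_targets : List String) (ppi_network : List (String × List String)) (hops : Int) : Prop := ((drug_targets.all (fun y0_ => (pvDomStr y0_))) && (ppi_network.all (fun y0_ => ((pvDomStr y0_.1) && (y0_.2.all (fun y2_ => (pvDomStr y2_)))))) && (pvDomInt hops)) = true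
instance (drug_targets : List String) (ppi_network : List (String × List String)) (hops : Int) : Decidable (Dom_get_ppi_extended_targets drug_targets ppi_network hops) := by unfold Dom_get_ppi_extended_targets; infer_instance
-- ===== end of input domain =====

-- B replaces A's every-hop re-expansion of the whole reached frontier by a BFS with a
-- visited set that expands only the genes newly discovered in the previous hop.
-- Return value only; neither version mutates its arguments.

-- ===== PORT A =====
-- next_hop = set(); for gene in current: if gene in ppi_network: next_hop.update(ppi_network[gene])
def pvA_next (ppi : List (String × List String)) (current : List String) : List String :=
  current.foldl (fun nh gene =>
    match ppi.lookup gene with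
    | some ns => PySem.Set.update nh ns
    | none => nh) []

-- for _ in range(hops): … extended.update(next_hop); current = next_hop
def pvA_loop (ppi : List (String × List String)) : Nat → List String → List String → List String
  | 0, ext, _ => ext
  | n+1, ext, cur =>
    let nh := pvA_next ppi cur
    pvA_loop ppi n (PySem.Set.update ext nh) nh

def get_ppi_extended_targets (drug_targets : List String) (ppi_network : List (String × List String)) (hops : Int) : List String :=
  pvA_loop ppi_network hops.toNat (PySem.Set.ofList drug_targets) (PySem.Set.ofList drug_targets)

-- ===== PORT B =====
-- for nb in ppi_network.get(gene, ()): if nb not in visited: visited.add(nb); new.append(nb)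
def pvB_scan (ppi : List (String × List String)) (st : List String × List String) (gene : String) : List String × List String :=
  match ppi.lookup gene with
  | some ns => ns.foldl (fun st2 nb => if st2.1.contains nb then st2 else (st2.1 ++ [nb], st2.2 ++ [nb])) st
  | none => st

-- for _ in range(hops): new = []; for gene in frontier: …; frontier = new
def pvB_loop (ppi : List (String × List String)) : Nat → List String → List String → List String
  | 0, visited, _ => visited
  | n+1, visited, frontier =>
    let st := frontier.foldl (pvB_scan ppi) (visited, [])
    pvB_loop ppi n st.1 st.2

def get_ppi_extended_targets_alt (drug_targets : List String) (ppi_network : List (String × List String)) (hops : Int) : List String :=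
  let visited := PySem.Set.ofList drug_targets
  pvB_loop ppi_network hops.toNat visited visited

-- ===== PRECONDITION & SPEC =====
def Spec_get_ppi_extended_targets (drug_targets : List String) (ppi_network : List (String × List String)) (hops : Int) (out : List String) : Prop := out = get_ppi_extended_targets_alt drug_targets ppi_network hops
instance (drug_targets : List String) (ppi_network : List (String × List String)) (hops : Int) (out : List String) : Decidable (Spec_get_ppi_extended_targets drug_targets ppi_network hops out) := by unfold Spec_get_ppi_extended_targets; infer_instance

-- ===== CLAIM (what is proved, stated in full; the proofs are below) =====
def Claim_equal_get_ppi_extended_targets : Prop := ∀ (drug_targets : List String) (ppi_network : List (String × List String)) (hops : Int), Dom_get_ppi_extended_targets drug_targets ppi_network hops → Spec_get_ppi_extended_targets drug_targets ppi_network hops (get_ppi_extended_targets drug_targets ppi_network hops)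

-- ===== LEMMAS AND PROOFS =====

-- neighbor list of a gene ([] when absent) and concatenated neighbors of a gene list
def pvNbrs (ppi : List (String × List String)) (g : String) : List String := (ppi.lookup g).getD []

def pvConc (ppi : List (String × List String)) (c : List String) : List String := c.flatMap (pvNbrs ppi)

-- "fresh sublist": first occurrences of elements of l not already in v, in order
def pvFl : List String → List String → List String
  | _, [] => []
  | v, x :: l => if x ∈ v then pvFl v l else x :: pvFl (v ++ [x]) l

theorem pvFl_add (l v : List String) : l.foldl PySem.Set.add v = v ++ pvFl v l := by
  induction l generalizing v with
  | nil => simp [pvFl]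
  | cons x l ih =>
    simp only [List.foldl_cons, PySem.Set.add, PySem.Set.contains, pvFl]
    by_cases hx : x ∈ v
    · simp [hx, ih]
    · simp [hx, ih]

theorem pvFl_append (a b v : List String) : pvFl v (a ++ b) = pvFl v a ++ pvFl (v ++ pvFl v a) b := by
  induction a generalizing v with
  | nil => simp [pvFl]
  | cons x a ih =>
    simp only [List.cons_append, pvFl]
    by_cases hx : x ∈ v
    · simp [hx, ih]
    · simp [hx, ih, List.append_assoc]

theorem pvFl_mem {x : String} {l v : List String} : x ∈ pvFl v l ↔ x ∈ l ∧ x ∉ v := by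
  induction l generalizing v with
  | nil => simp [pvFl]
  | cons y l ih =>
    simp only [pvFl]
    by_cases hy : y ∈ v
    · simp only [if_pos hy, ih, List.mem_cons]
      constructor
      · rintro ⟨h1, h2⟩; exact ⟨Or.inr h1, h2⟩
      · rintro ⟨h1, h2⟩
        rcases h1 with rfl | h1
        · exact absurd hy h2
        · exact ⟨h1, h2⟩
    · simp only [if_neg hy, List.mem_cons, ih, List.mem_append]
      constructor
      · rintro (rfl | ⟨h1, h2⟩)
        · exact ⟨Or.inl rfl, hy⟩
        · exact ⟨Or.inr h1, fun hv => h2 (Or.inl hv)⟩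
      · rintro ⟨rfl | h1, h2⟩
        · exact Or.inl rfl
        · by_cases hx : x = y
          · exact Or.inl hx
          · exact Or.inr ⟨h1, by simp [h2, hx]⟩

theorem pvFl_nil_of_sub {l v : List String} (h : ∀ x ∈ l, x ∈ v) : pvFl v l = [] := by
  induction l with
  | nil => rfl
  | cons x l ih => simp [pvFl, h x (by simp)]; exact ih fun y hy => h y (by simp [hy])

theorem pvFl_fl {l w v : List String} (h : ∀ y ∈ w, y ∈ v) : pvFl v (pvFl w l) = pvFl v l := by
  induction l generalizing w v with
  | nil => rfl
  | cons x l ih =>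
    by_cases hw : x ∈ w
    · have e1 : pvFl w (x::l) = pvFl w l := by simp [pvFl, hw]
      have e2 : pvFl v (x::l) = pvFl v l := by simp [pvFl, h x hw]
      rw [e1, e2, ih h]
    · have e1 : pvFl w (x::l) = x :: pvFl (w ++ [x]) l := by simp [pvFl, hw]
      rw [e1]
      by_cases hv : x ∈ v
      · have h' : ∀ y ∈ w ++ [x], y ∈ v := by
          intro y hy; rcases List.mem_append.1 hy with hy | hy
          · exact h y hy
          · simp at hy; subst hy; exact hv
        have e2 : pvFl v (x :: pvFl (w ++ [x]) l) = pvFl v (pvFl (w ++ [x]) l) := by simp [pvFl, hv]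
        have e3 : pvFl v (x::l) = pvFl v l := by simp [pvFl, hv]
        rw [e2, e3, ih h']
      · have h' : ∀ y ∈ w ++ [x], y ∈ v ++ [x] := by
          intro y hy; rcases List.mem_append.1 hy with hy | hy
          · exact List.mem_append.2 (Or.inl (h y hy))
          · exact List.mem_append.2 (Or.inr hy)
        have e2 : pvFl v (x :: pvFl (w ++ [x]) l) = x :: pvFl (v ++ [x]) (pvFl (w ++ [x]) l) := by simp [pvFl, hv]
        have e3 : pvFl v (x::l) = x :: pvFl (v ++ [x]) l := by simp [pvFl, hv]
        rw [e2, e3, ih h']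

theorem pvFoldl_conc {α : Type} (ppi : List (String × List String)) (c : List String)
    (f : α → String → α) (init : α) :
    c.foldl (fun acc g => (pvNbrs ppi g).foldl f acc) init = (pvConc ppi c).foldl f init := by
  induction c generalizing init with
  | nil => rfl
  | cons g c ih => simp only [List.foldl_cons, pvConc, List.flatMap_cons, List.foldl_append]; exact ih _

theorem pvA_next_eq (ppi : List (String × List String)) (cur : List String) :
    pvA_next ppi cur = pvFl [] (pvConc ppi cur) := by
  unfold pvA_next
  have hstep : (fun (nh : List String) (gene : String) => match ppi.lookup gene with
      | some ns => PySem.Set.update nh ns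
      | none => nh)
      = fun nh gene => (pvNbrs ppi gene).foldl PySem.Set.add nh := by
    funext nh gene
    unfold pvNbrs
    cases h : ppi.lookup gene with
    | none => simp
    | some ns => simp [PySem.Set.update]
  rw [hstep, pvFoldl_conc, pvFl_add]
  simp

theorem pvB_inner (L : List String) (v nw : List String) :
    L.foldl (fun st2 nb => if st2.1.contains nb then st2 else (st2.1 ++ [nb], st2.2 ++ [nb])) ((v, nw) : List String × List String)
      = (v ++ pvFl v L, nw ++ pvFl v L) := by

  induction L generalizing v nw with
  | nil => simp [pvFl]
  | cons x L ih =>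
    rw [List.foldl_cons]
    by_cases hx : x ∈ v
    · have hc : v.contains x = true := by simpa using hx
      simp only [hc, if_true]
      rw [ih]
      simp [pvFl, hx]
    · have hc : v.contains x = false := by simpa using hx
      simp only [hc, Bool.false_eq_true, if_false]
      rw [ih]
      simp [pvFl, hx, List.append_assoc]

theorem pvB_step (ppi : List (String × List String)) (fro v : List String) :
    fro.foldl (pvB_scan ppi) (v, ([] : List String))
      = (v ++ pvFl v (pvConc ppi fro), pvFl v (pvConc ppi fro)) := by
  have hstep : pvB_scan ppi = fun st gene => (pvNbrs ppi gene).foldl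
      (fun st2 nb => if st2.1.contains nb then st2 else (st2.1 ++ [nb], st2.2 ++ [nb])) st := by
    funext st gene
    unfold pvB_scan pvNbrs
    cases h : ppi.lookup gene with
    | none => simp
    | some ns => simp
  rw [hstep, pvFoldl_conc, pvB_inner]
  simp

-- A's current list is B's frontier with extra "dead" genes (all neighbors already reached) interleaved
inductive pvEmb (ppi : List (String × List String)) (E : List String) : List String → List String → Prop
  | nil : pvEmb ppi E [] []
  | cons (x : String) {c f : List String} : pvEmb ppi E c f → pvEmb ppi E (x :: c) (x :: f)
  | dead (x : String) {c f : List String} : (∀ nb ∈ pvNbrs ppi x, nb ∈ E) → pvEmb ppi E c f → pvEmb ppi E (x :: c) f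

theorem pvEmb_refl (ppi : List (String × List String)) (E c : List String) : pvEmb ppi E c c := by
  induction c with
  | nil => exact pvEmb.nil
  | cons x c ih => exact pvEmb.cons x ih

theorem pvEmb_fl {ppi : List (String × List String)} {E c f : List String}
    (h : pvEmb ppi E c f) : ∀ v, (∀ y ∈ E, y ∈ v) →
    pvFl v (pvConc ppi c) = pvFl v (pvConc ppi f) := by
  induction h with
  | nil => intro v hv; rfl
  | cons x hemb ih =>
    intro v hv
    simp only [pvConc, List.flatMap_cons]
    rw [pvFl_append, pvFl_append]
    have := ih (v ++ pvFl v (pvNbrs ppi x)) (fun y hy => List.mem_append.2 (Or.inl (hv y hy)))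
    simp only [pvConc] at this
    rw [this]
  | dead x hd hemb ih =>
    intro v hv
    simp only [pvConc, List.flatMap_cons]
    rw [pvFl_append, pvFl_nil_of_sub (fun nb hnb => hv nb (hd nb hnb))]
    have := ih v hv
    simp only [pvConc] at this
    rw [List.append_nil, this, List.nil_append]

theorem pvEmbFL (ppi : List (String × List String)) (E : List String) (L : List String) :
    ∀ w v, (∀ y ∈ w, y ∈ v) →
    (∀ g ∈ L, g ∈ v → g ∉ w → ∀ nb ∈ pvNbrs ppi g, nb ∈ E) →
    pvEmb ppi E (pvFl w L) (pvFl v L) := by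
  induction L with
  | nil => intro w v _ _; exact pvEmb.nil
  | cons x L ih =>
    intro w v h1 h2
    by_cases hw : x ∈ w
    · have e1 : pvFl w (x :: L) = pvFl w L := by simp [pvFl, hw]
      have e2 : pvFl v (x :: L) = pvFl v L := by simp [pvFl, h1 x hw]
      rw [e1, e2]
      exact ih w v h1 (fun g hg => h2 g (List.mem_cons_of_mem x hg))
    · have e1 : pvFl w (x :: L) = x :: pvFl (w ++ [x]) L := by simp [pvFl, hw]
      rw [e1]
      by_cases hv : x ∈ v
      · have e2 : pvFl v (x :: L) = pvFl v L := by simp [pvFl, hv]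
        rw [e2]
        refine pvEmb.dead x (h2 x (List.mem_cons_self) hv hw) ?_
        refine ih (w ++ [x]) v ?_ ?_
        · intro y hy
          rcases List.mem_append.1 hy with hy | hy
          · exact h1 y hy
          · simp at hy; subst hy; exact hv
        · intro g hg hgv hgw
          exact h2 g (List.mem_cons_of_mem x hg) hgv (fun hmem => hgw (List.mem_append.2 (Or.inl hmem)))
      · have e2 : pvFl v (x :: L) = x :: pvFl (v ++ [x]) L := by simp [pvFl, hv]
        rw [e2]
        refine pvEmb.cons x ?_
        refine ih (w ++ [x]) (v ++ [x]) ?_ ?_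
        · intro y hy
          rcases List.mem_append.1 hy with hy | hy
          · exact List.mem_append.2 (Or.inl (h1 y hy))
          · exact List.mem_append.2 (Or.inr hy)
        · intro g hg hgv hgw
          have hgx : g ≠ x := by
            intro hgx; exact hgw (List.mem_append.2 (Or.inr (by simp [hgx])))
          have hgv' : g ∈ v := by
            rcases List.mem_append.1 hgv with h | h
            · exact h
            · simp at h; exact absurd h hgx
          exact h2 g (List.mem_cons_of_mem x hg) hgv' (fun hmem => hgw (List.mem_append.2 (Or.inl hmem)))

def pvInv (ppi : List (String × List String)) (ext cur vis fro : List String) : Prop :=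
  ext = vis ∧ pvEmb ppi ext cur fro ∧ ∀ g ∈ ext, g ∈ cur ∨ ∀ nb ∈ pvNbrs ppi g, nb ∈ ext

theorem pvMain (ppi : List (String × List String)) :
    ∀ (n : Nat) (ext cur vis fro : List String), pvInv ppi ext cur vis fro →
    pvA_loop ppi n ext cur = pvB_loop ppi n vis fro := by
  intro n
  induction n with
  | zero => intro ext cur vis fro hinv; exact hinv.1
  | succ n ih =>
    rintro ext cur vis fro ⟨heq, hemb, hscan⟩
    subst heq
    simp only [pvA_loop, pvB_loop]
    rw [pvA_next_eq, pvB_step]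
    have hff : pvFl ext (pvConc ppi fro) = pvFl ext (pvConc ppi cur) :=
      (pvEmb_fl hemb ext (fun y hy => hy)).symm
    have hupd : PySem.Set.update ext (pvFl [] (pvConc ppi cur)) = ext ++ pvFl ext (pvConc ppi cur) := by
      show (pvFl [] (pvConc ppi cur)).foldl PySem.Set.add ext = _
      rw [pvFl_add, pvFl_fl (by simp)]
    rw [hff, hupd]
    have hLsub : ∀ nb ∈ pvConc ppi cur, nb ∈ ext ++ pvFl ext (pvConc ppi cur) := by
      intro nb hnb
      by_cases h : nb ∈ ext
      · exact List.mem_append.2 (Or.inl h)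
      · exact List.mem_append.2 (Or.inr (pvFl_mem.2 ⟨hnb, h⟩))
    refine ih _ _ _ _ ⟨rfl, ?_, ?_⟩
    · refine pvEmbFL ppi _ (pvConc ppi cur) [] ext (by simp) ?_
      intro g hgL hgext _ nb hnb
      rcases hscan g hgext with hcur | hsub
      · exact hLsub nb (List.mem_flatMap.2 ⟨g, hcur, hnb⟩)
      · exact List.mem_append.2 (Or.inl (hsub nb hnb))
    · intro g hg
      rcases List.mem_append.1 hg with hg | hg
      · rcases hscan g hg with hcur | hsub
        · exact Or.inr (fun nb hnb => hLsub nb (List.mem_flatMap.2 ⟨g, hcur, hnb⟩))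
        · exact Or.inr (fun nb hnb => List.mem_append.2 (Or.inl (hsub nb hnb)))
      · exact Or.inl (pvFl_mem.2 ⟨(pvFl_mem.1 hg).1, by simp⟩)

-- ===== VERDICT (by name: the statement is the Claim_ definition above) =====
theorem get_ppi_extended_targets_spec : Claim_equal_get_ppi_extended_targets := by
  intro dt ppi hops _
  unfold Spec_get_ppi_extended_targets get_ppi_extended_targets get_ppi_extended_targets_alt
  exact pvMain ppi hops.toNat _ _ _ _ ⟨rfl, pvEmb_refl ppi _ _, fun g hg => Or.inl hg⟩
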